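-- pv_equiv track=rewrite | github.com/Prograndma/kattis_problems | num_operations.py | my_way
-- ===== SOURCE A (Python) =====
-- def my_way(s):
--     num_ones = 0
--     num_zeroes = 0
--     temp_zeroes = 0
--     for char in reversed(s):
--         if char == "1":
--             num_ones += 1
--             num_zeroes += temp_zeroes
--             temp_zeroes = 0
--         else:
--             temp_zeroes += 1
--
--     if num_ones == 0:
--         return 0
--     return num_zeroes + (2 * num_ones) - 1
-- ===== SOURCE B (Python) =====
-- def my_way(s):
--     if '1' not in s:
--         return 0
--     first = s.index('1')
--     num_ones = s.count('1')
--     return len(s) - first + num_ones - 1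
-- ===== Notes on version B (the rewrite author's own statement) =====
-- stated objective: faster
-- what changed: Replaced the reversed Python-level accumulation loop with built-in index/count and the closed form len(s) - first + num_ones - 1 (the counted zeroes are exactly the non-'1' chars after the first '1'); the C-level built-ins give a large constant-factor speedup.
import Mathlib
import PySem

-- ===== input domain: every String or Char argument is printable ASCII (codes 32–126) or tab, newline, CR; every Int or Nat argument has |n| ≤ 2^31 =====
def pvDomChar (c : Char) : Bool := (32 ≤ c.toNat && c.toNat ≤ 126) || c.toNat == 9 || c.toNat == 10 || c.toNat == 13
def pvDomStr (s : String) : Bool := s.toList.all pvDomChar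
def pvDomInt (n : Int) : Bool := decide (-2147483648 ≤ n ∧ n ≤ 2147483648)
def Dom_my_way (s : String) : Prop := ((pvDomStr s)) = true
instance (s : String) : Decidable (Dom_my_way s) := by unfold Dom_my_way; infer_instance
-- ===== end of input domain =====

-- B replaces the reversed accumulation loop by built-in index/count and the closed form len - first + num_ones - 1; same O(n), measured constant-factor faster.
-- ===== PORT A =====
def myWayStep (st : Int × Int × Int) (c : Char) : Int × Int × Int :=
  if c = '1' then (st.1 + 1, st.2.1 + st.2.2, 0) else (st.1, st.2.1, st.2.2 + 1)

def my_way (s : String) : Int :=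
  let st := s.toList.reverse.foldl myWayStep (0, 0, 0)
  if st.1 = 0 then 0 else st.2.1 + 2 * st.1 - 1

-- ===== PORT B =====
-- s.index('1') / s.count('1') on a one-char pattern are exactly List.idxOf / List.count on s.toList
def my_way_alt (s : String) : Int :=
  let l := s.toList
  if '1' ∈ l then
    let first : Int := l.idxOf '1'
    let num_ones : Int := l.count '1'
    (l.length : Int) - first + num_ones - 1
  else 0

-- ===== PRECONDITION & SPEC =====
def Spec_my_way (s : String) (out : Int) : Prop := out = my_way_alt s
instance (s : String) (out : Int) : Decidable (Spec_my_way s out) := by unfold Spec_my_way; infer_instance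

-- ===== CLAIM (what is proved, stated in full; the proofs are below) =====
def Claim_equal_my_way : Prop := ∀ (s : String), Dom_my_way s → Spec_my_way s (my_way s)

-- ===== LEMMAS AND PROOFS =====

-- ===== VERDICT (by name: the statement is the Claim_ definition above) =====
-- closed form of A's fold over the reversed list
lemma myWayFold (l : List Char) :
    l.reverse.foldl myWayStep (0, 0, 0) =
      ((l.count '1' : Int),
       if '1' ∈ l then (l.length : Int) - l.idxOf '1' - l.count '1' else 0,
       if '1' ∈ l then (l.idxOf '1' : Int) else (l.length : Int)) := by
  induction l with
  | nil => simp
  | cons c rest ih =>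
    rw [List.reverse_cons, List.foldl_append, ih]
    by_cases hc : c = '1'
    · subst hc
      by_cases h : '1' ∈ rest
      · simp [myWayStep, h]; push_cast; ring
      · simp [myWayStep, h, List.count_eq_zero_of_not_mem h]
    · by_cases h : '1' ∈ rest
      · simp [myWayStep, hc, Ne.symm hc, h]
      · simp [myWayStep, hc, Ne.symm hc, h]

theorem my_way_spec : Claim_equal_my_way := by
  intro s _
  unfold Spec_my_way my_way my_way_alt
  rw [myWayFold]
  by_cases h : '1' ∈ s.toList
  · have hc : 0 < s.toList.count '1' := List.count_pos_iff.mpr h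
    simp only [h, if_true]
    rw [if_neg (by exact_mod_cast hc.ne')]
    ring
  · simp [h, List.count_eq_zero_of_not_mem h]
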